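-- pv_equiv track=rewrite | github.com/elyashivzangen/yissum | papers_pipeline.py | is_huji_paper
-- ===== SOURCE A (Python) =====
-- HUJI_AFFILIATIONS = [
--     "Hebrew University of Jerusalem",
--     "Hebrew University",
--     "Hadassah",
--     "Einstein Institute of Mathematics",
--     "Silberman Institute",
-- ]
--
-- def is_huji_paper(authors_with_affs):
--     """True if the last author OR the majority of authors are HUJI/Hadassah-affiliated.
--
--     Hadassah is the clinical arm of HUJI and is treated identically to HUJI:
--     keep if the last author or >50% of authors are from Hadassah or Hebrew University.
--
--     authors_with_affs: list (one element per author) of lists of affiliation strings.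
--     """
--     if not authors_with_affs:
--         return False
--
--     def has_huji(affs):
--         return any(h.lower() in af.lower() for h in HUJI_AFFILIATIONS for af in affs)
--
--     if has_huji(authors_with_affs[-1]):
--         return True
--     huji_count = sum(1 for affs in authors_with_affs if has_huji(affs))
--     return huji_count > len(authors_with_affs) / 2
-- ===== SOURCE B (Python) =====
-- HUJI_AFFILIATIONS = [
--     "Hebrew University of Jerusalem",
--     "Hebrew University",
--     "Hadassah",
--     "Einstein Institute of Mathematics",
--     "Silberman Institute",
-- ]
--
-- def is_huji_paper(authors_with_affs):
--     """Reverse-order vote tally: walk the authors last-to-first; the first one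
--     seen (the last author) decides immediately if HUJI; otherwise keep a signed
--     margin (+1 HUJI / -1 not) and the paper is kept iff the margin ends positive
--     (equivalent to a strict majority, with no count-vs-length comparison)."""
--     if not authors_with_affs:
--         return False
--
--     def has_huji(affs):
--         return any(h.lower() in af.lower() for h in HUJI_AFFILIATIONS for af in affs)
--
--     rev = list(reversed(authors_with_affs))
--     if has_huji(rev[0]):
--         return True
--     margin = -1  # the last author already voted "not HUJI"
--     for affs in rev[1:]:
--         margin += 1 if has_huji(affs) else -1
--     return margin > 0
-- ===== Notes on version B (the rewrite author's own statement) =====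
-- stated objective: alternative
-- what changed: Replaces A's count-then-compare-to-len/2 structure with a reverse-order signed vote tally: iterate the authors last-to-first, return immediately on the last author's hit, otherwise accumulate a +1/-1 margin and decide by margin > 0, so no count, no length and no len/2 comparison appear.
import Mathlib
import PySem

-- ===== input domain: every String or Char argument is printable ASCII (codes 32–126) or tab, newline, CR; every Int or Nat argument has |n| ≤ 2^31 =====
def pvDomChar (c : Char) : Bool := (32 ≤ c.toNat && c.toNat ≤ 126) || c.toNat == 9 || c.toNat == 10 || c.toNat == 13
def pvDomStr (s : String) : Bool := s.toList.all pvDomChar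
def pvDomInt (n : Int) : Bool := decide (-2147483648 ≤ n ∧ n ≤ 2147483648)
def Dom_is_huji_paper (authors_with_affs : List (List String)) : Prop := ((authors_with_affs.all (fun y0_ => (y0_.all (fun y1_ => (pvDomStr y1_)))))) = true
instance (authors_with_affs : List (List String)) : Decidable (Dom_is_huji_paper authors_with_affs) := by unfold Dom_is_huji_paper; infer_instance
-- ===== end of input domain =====

-- B replaces A's count-then-compare-to-len/2 with a reverse-order signed vote tally
-- (early return on the last author, then a +1/-1 margin): alternative algorithm, same cost.

def pvHujiAffiliations : List String :=
  ["Hebrew University of Jerusalem", "Hebrew University", "Hadassah",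
   "Einstein Institute of Mathematics", "Silberman Institute"]

-- shared helper `has_huji` (identical in both Pythons): any HUJI name is a
-- case-insensitive substring of any affiliation string
def pvHasHuji (affs : List String) : Bool :=
  pvHujiAffiliations.any (fun h =>
    affs.any (fun af => PySem.Str.isIn (PySem.Str.lower h) (PySem.Str.lower af)))

-- ===== PORT A =====
-- A's `huji_count > len/2` compares int with Python float len/2; for these sizes it is
-- exactly `2*count > len`, ported as such on Int.
def is_huji_paper (authors_with_affs : List (List String)) : Bool :=
  if authors_with_affs = [] then false
  else if pvHasHuji (PySem.List.pyGetD authors_with_affs (-1) []) then true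
  else
    decide (2 * (List.foldl (fun acc affs => if pvHasHuji affs then acc + 1 else acc)
                  (0 : Int) authors_with_affs) > (authors_with_affs.length : Int))

-- ===== PORT B =====
-- reversed(...) → List.reverse; rev[0]/rev[1:] read off the nonempty reverse.
def is_huji_paper_alt (authors_with_affs : List (List String)) : Bool :=
  if authors_with_affs = [] then false
  else
    match authors_with_affs.reverse with
    | [] => false  -- unreachable: reverse of a nonempty list
    | last :: rest =>
      if pvHasHuji last then true
      else
        decide ((List.foldl (fun m affs => if pvHasHuji affs then m + 1 else m - 1)
                  (-1 : Int) rest) > 0)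

-- ===== PRECONDITION & SPEC =====
def Spec_is_huji_paper (authors_with_affs : List (List String)) (out : Bool) : Prop := out = is_huji_paper_alt authors_with_affs
instance (authors_with_affs : List (List String)) (out : Bool) : Decidable (Spec_is_huji_paper authors_with_affs out) := by unfold Spec_is_huji_paper; infer_instance

-- ===== CLAIM (what is proved, stated in full; the proofs are below) =====
def Claim_equal_is_huji_paper : Prop := ∀ (authors_with_affs : List (List String)), Dom_is_huji_paper authors_with_affs → Spec_is_huji_paper authors_with_affs (is_huji_paper authors_with_affs)

-- ===== LEMMAS AND PROOFS =====

-- the ±1 vote fold in closed form: start + 2·(hits) − length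
theorem pvMarginFold (t : List (List String)) (s : Int) :
    List.foldl (fun m affs => if pvHasHuji affs then m + 1 else m - 1) s t
      = s + 2 * (t.countP pvHasHuji : Int) - (t.length : Int) := by
  induction t generalizing s with
  | nil => simp
  | cons a t ih =>
    simp only [List.foldl_cons, List.countP_cons, List.length_cons, ih]
    by_cases h : pvHasHuji a <;> simp [h] <;> ring

-- ===== VERDICT (by name: the statement is the Claim_ definition above) =====
theorem is_huji_paper_spec : Claim_equal_is_huji_paper := by
  intro l _
  unfold Spec_is_huji_paper is_huji_paper is_huji_paper_alt
  by_cases hnil : l = []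
  · simp [hnil]
  · simp only [hnil, if_false]
    obtain ⟨last, rest, hrev⟩ : ∃ a t, l.reverse = a :: t := by
      rcases hr : l.reverse with _ | ⟨a, t⟩
      · exact absurd (by simpa using congrArg List.reverse hr) hnil
      · exact ⟨a, t, rfl⟩
    have hl : l = rest.reverse ++ [last] := by
      have := congrArg List.reverse hrev
      simpa using this
    rw [hrev, hl, PySem.List.pyGetD_neg_one_append_singleton]
    by_cases hlast : pvHasHuji last
    · simp [hlast]
    · simp only [hlast, if_false, Bool.false_eq_true]
      rw [PySem.List.foldl_count_if, pvMarginFold]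
      simp only [List.countP_append, List.countP_reverse, List.countP_cons, List.length_append,
        List.length_reverse, List.length_cons, List.countP_nil, List.length_nil, hlast]
      simp only [decide_eq_decide]
      push_cast
      omega
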